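-- pv_equiv track=rewrite | github.com/robcarver17/pysystemtrade | syscore/text.py | count_leading_underscores_in_string
-- ===== SOURCE A (Python) =====
-- def count_leading_underscores_in_string(process_string):
--     """
--     How many underscores at start of process string
--
--     :param process_string: str
--     :return: int
--     """
--     if len(process_string) == 0:
--         raise Exception(
--             "Can't pass a parameter name consisting only of underscores or a zero length string"
--         )
--
--     if process_string[0] == "_":
--         return count_leading_underscores_in_string(process_string[1:]) + 1
--
--     return 0
-- ===== SOURCE B (Python) =====
-- def count_leading_underscores_in_string(process_string):
--     """
--     How many underscores at start of process string
--
--     :param process_string: str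
--     :return: int
--     """
--     n = 0
--     for ch in process_string:
--         if ch != "_":
--             break
--         n += 1
--     if n == len(process_string):
--         raise Exception(
--             "Can't pass a parameter name consisting only of underscores or a zero length string"
--         )
--     return n
-- ===== Notes on version B (the rewrite author's own statement) =====
-- stated objective: simpler
-- what changed: Replaced the recursion that slices a fresh string each step with a single forward loop over the characters that increments a counter while it sees '_' and raises iff the counter consumed the whole string (covers empty and all-underscore inputs).
import Mathlib
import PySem

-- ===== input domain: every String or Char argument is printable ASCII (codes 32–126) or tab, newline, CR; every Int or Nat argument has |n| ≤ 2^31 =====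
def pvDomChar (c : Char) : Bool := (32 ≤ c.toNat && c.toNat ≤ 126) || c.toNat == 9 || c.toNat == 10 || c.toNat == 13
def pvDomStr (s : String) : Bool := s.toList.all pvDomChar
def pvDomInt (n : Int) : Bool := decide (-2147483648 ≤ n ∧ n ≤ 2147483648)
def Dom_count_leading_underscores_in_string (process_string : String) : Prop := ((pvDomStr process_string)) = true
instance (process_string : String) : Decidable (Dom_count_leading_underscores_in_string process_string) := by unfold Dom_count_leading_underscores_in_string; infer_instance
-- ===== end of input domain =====

-- B replaces A's recursion-with-slicing by one forward loop with a counter (simpler, no per-step slice); both raise on all-underscore or empty strings, which Pre_ excludes.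

-- ===== PORT A =====
-- A's recursion on the string: empty → raise (excluded by Pre_; 0 here), '_' head → recurse on tail + 1, else 0.
def pvA_rec : List Char → Int
  | [] => 0          -- Python raises here; Pre_ excludes such inputs
  | c :: rest => if c = '_' then pvA_rec rest + 1 else 0

def count_leading_underscores_in_string (process_string : String) : Int :=
  pvA_rec process_string.toList

-- ===== PORT B =====
-- B's for-loop state: (counter, broke-out flag)
def pvB_step (st : Int × Bool) (ch : Char) : Int × Bool :=
  if st.2 then st else if ch ≠ '_' then (st.1, true) else (st.1 + 1, false)

def count_leading_underscores_in_string_alt (process_string : String) : Int :=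
  let cs := process_string.toList
  let n := (cs.foldl pvB_step (0, false)).1
  if n = (cs.length : Int) then 0 else n   -- Python raises on the 'then' branch; Pre_ excludes such inputs

-- ===== PRECONDITION & SPEC =====
-- Pre_ excludes exactly the inputs where A (and B) raise: the empty string and all-underscore strings.
def Pre_count_leading_underscores_in_string (process_string : String) : Prop :=
  process_string.toList.any (· ≠ '_') = true
instance (process_string : String) : Decidable (Pre_count_leading_underscores_in_string process_string) := by unfold Pre_count_leading_underscores_in_string; infer_instance
def pvWitness_count_leading_underscores_in_string : String := "__ab"

def Spec_count_leading_underscores_in_string (process_string : String) (out : Int) : Prop := out = count_leading_underscores_in_string_alt process_string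
instance (process_string : String) (out : Int) : Decidable (Spec_count_leading_underscores_in_string process_string out) := by unfold Spec_count_leading_underscores_in_string; infer_instance

-- ===== CLAIM (what is proved, stated in full; the proofs are below) =====
def Claim_equal_count_leading_underscores_in_string : Prop := ∀ (process_string : String), Dom_count_leading_underscores_in_string process_string → Pre_count_leading_underscores_in_string process_string → Spec_count_leading_underscores_in_string process_string (count_leading_underscores_in_string process_string)

-- ===== LEMMAS AND PROOFS =====

theorem pvB_done (cs : List Char) (k : Int) : cs.foldl pvB_step (k, true) = (k, true) := by
  induction cs with
  | nil => rfl
  | cons c rest ih => simpa [List.foldl, pvB_step] using ih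

theorem pvB_fst (cs : List Char) (k : Int) :
    (cs.foldl pvB_step (k, false)).1 = k + pvA_rec cs := by
  induction cs generalizing k with
  | nil => simp [pvA_rec]
  | cons c rest ih =>
    by_cases h : c = '_'
    · simp only [List.foldl, pvB_step, h]
      simp [ih (k + 1), pvA_rec]
      ring
    · simp [List.foldl, pvB_step, h, pvB_done, pvA_rec]

theorem pvA_lt (cs : List Char) (h : cs.any (· ≠ '_') = true) :
    pvA_rec cs < (cs.length : Int) := by
  induction cs with
  | nil => simp at h
  | cons c rest ih =>
    by_cases hc : c = '_'
    · have hrest : rest.any (· ≠ '_') = true := by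
        simpa [List.any_cons, hc] using h
      have := ih hrest
      simp only [pvA_rec, hc, if_true, List.length_cons]
      push_cast
      omega
    · simp only [pvA_rec, hc, if_false, List.length_cons]
      have : (0:Int) ≤ rest.length := by positivity
      push_cast
      omega

-- ===== VERDICT (by name: the statement is the Claim_ definition above) =====
theorem count_leading_underscores_in_string_spec : Claim_equal_count_leading_underscores_in_string := by
  intro s _ hpre
  unfold Spec_count_leading_underscores_in_string count_leading_underscores_in_string count_leading_underscores_in_string_alt
  have h1 := pvB_fst s.toList 0
  have h2 := pvA_lt s.toList hpre
  simp only [h1, zero_add]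
  rw [if_neg (by omega)]
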